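-- pv_equiv track=rewrite | github.com/6210qwe/leetcode_py | leetcode_solutions/by_id/q1511.py | solution_function_name
-- ===== SOURCE A (Python) =====
-- from typing import List, Optional
--
-- def solution_function_name(rating: List[int]) -> int:
--     """
--     函数式接口 - 统计满足条件的三元组数量
--     """
--     n = len(rating)
--     if n < 3:
--         return 0
--
--     # 初始化 left 和 right 数组
--     left_less = [0] * n
--     left_greater = [0] * n
--     right_less = [0] * n
--     right_greater = [0] * n
--
--     # 计算 left 数组
--     for i in range(n):
--         for j in range(i):
--             if rating[j] < rating[i]:
--                 left_less[i] += 1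
--             else:
--                 left_greater[i] += 1
--
--     # 计算 right 数组
--     for i in range(n - 1, -1, -1):
--         for j in range(n - 1, i, -1):
--             if rating[j] < rating[i]:
--                 right_less[i] += 1
--             else:
--                 right_greater[i] += 1
--
--     # 计算满足条件的三元组数量
--     count = 0
--     for i in range(n):
--         count += left_less[i] * right_greater[i]
--         count += left_greater[i] * right_less[i]
--
--     return count
-- ===== SOURCE B (Python) =====
-- def solution_function_name(rating):
--     n = len(rating)
--     # number of elements strictly smaller than v anywhere in rating:
--     # first-occurrence index in the sorted order
--     smaller = {}
--     for k, v in enumerate(sorted(rating)):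
--         if v not in smaller:
--             smaller[v] = k
--     total = 0
--     seen = []
--     for m, v in enumerate(rating):
--         ll = len([x for x in seen if x < v])       # smaller on the left
--         rl = smaller[v] - ll                       # smaller on the right
--         total += ll * (n - 1 - m - rl) + (m - ll) * rl
--         seen.append(v)
--     return total
-- ===== Notes on version B (the rewrite author's own statement) =====
-- stated objective: faster
-- what changed: Replaces A's two nested index-loop passes that maintain four per-index arrays by a single left-to-right pass: only the left smaller-count is scanned, the right smaller-count comes from a rank dict built by one sort (first-occurrence index in sorted order = number of strictly smaller elements), and both greater-counts are derived arithmetically.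
import Mathlib
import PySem

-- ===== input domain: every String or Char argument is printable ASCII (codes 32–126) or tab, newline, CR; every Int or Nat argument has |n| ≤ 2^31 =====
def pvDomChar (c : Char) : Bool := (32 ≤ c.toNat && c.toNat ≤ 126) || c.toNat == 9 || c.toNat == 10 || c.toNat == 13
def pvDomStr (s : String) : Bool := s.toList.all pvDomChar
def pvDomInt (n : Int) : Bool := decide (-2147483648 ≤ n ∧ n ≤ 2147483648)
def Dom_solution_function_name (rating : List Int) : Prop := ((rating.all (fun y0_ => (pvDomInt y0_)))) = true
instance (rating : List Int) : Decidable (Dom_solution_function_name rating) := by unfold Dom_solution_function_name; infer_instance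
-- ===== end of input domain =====

-- B replaces A's two nested index-loop passes over four arrays by a single left-to-right pass
-- plus a rank dict built from one sort (a timing run measures the speed claim).

-- ===== PORT A =====
-- inner-loop body shared by A's two nested passes (identical Python code in both loops)
def pvInnerStep (rating : List Int) (i : Int) (s : List Int × List Int) (j : Int) :
    List Int × List Int :=
  if PySem.List.pyGetD rating j 0 < PySem.List.pyGetD rating i 0 then
    (PySem.List.pySetD s.1 i (PySem.List.pyGetD s.1 i 0 + 1), s.2)
  else
    (s.1, PySem.List.pySetD s.2 i (PySem.List.pyGetD s.2 i 0 + 1))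

def solution_function_name (rating : List Int) : Int :=
  let n : Int := rating.length
  if n < 3 then 0
  else
    let left_less : List Int := List.replicate rating.length 0
    let left_greater : List Int := List.replicate rating.length 0
    let right_less : List Int := List.replicate rating.length 0
    let right_greater : List Int := List.replicate rating.length 0
    let lp := (PySem.List.pyRange 0 n 1).foldl
      (fun s i => (PySem.List.pyRange 0 i 1).foldl (pvInnerStep rating i) s)
      (left_less, left_greater)
    let rp := (PySem.List.pyRange (n - 1) (-1) (-1)).foldl
      (fun s i => (PySem.List.pyRange (n - 1) i (-1)).foldl (pvInnerStep rating i) s)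
      (right_less, right_greater)
    (PySem.List.pyRange 0 n 1).foldl
      (fun count i =>
        count + PySem.List.pyGetD lp.1 i 0 * PySem.List.pyGetD rp.2 i 0
              + PySem.List.pyGetD lp.2 i 0 * PySem.List.pyGetD rp.1 i 0) 0

-- ===== PORT B =====
-- B's loop body: left smaller-count by scanning the seen prefix, right smaller-count from the rank dict
def pvBStep (smaller : PySem.Dict Int Int) (n : Int) (s : Int × List Int) (mv : Int × Int) :
    Int × List Int :=
  let ll : Int := ((s.2.filter (fun x => decide (x < mv.2))).length : Int)
  let rl : Int := smaller.getD mv.2 0 - ll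
  (s.1 + ll * (n - 1 - mv.1 - rl) + (mv.1 - ll) * rl, s.2 ++ [mv.2])

def solution_function_name_alt (rating : List Int) : Int :=
  let n : Int := rating.length
  let smaller : PySem.Dict Int Int :=
    (PySem.List.enumerate (PySem.List.sorted rating (fun x => x) false) 0).foldl
      (fun d kv => if d.contains kv.2 then d else d.insert kv.2 kv.1) PySem.Dict.empty
  let res := (PySem.List.enumerate rating 0).foldl (pvBStep smaller n) (0, [])
  res.1

-- ===== PRECONDITION & SPEC =====
def Spec_solution_function_name (rating : List Int) (out : Int) : Prop := out = solution_function_name_alt rating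
instance (rating : List Int) (out : Int) : Decidable (Spec_solution_function_name rating out) := by unfold Spec_solution_function_name; infer_instance

-- ===== CLAIM (what is proved, stated in full; the proofs are below) =====
def Claim_equal_solution_function_name : Prop := ∀ (rating : List Int), Dom_solution_function_name rating → Spec_solution_function_name rating (solution_function_name rating)

-- ===== LEMMAS AND PROOFS =====

-- the per-middle-index term both programs sum
def pvTerm (r : List Int) (k : Nat) : Int :=
  let v := r.getD k 0
  let ll : Int := ((r.take k).countP (fun x => decide (x < v)) : Int)
  let rl : Int := ((r.drop (k + 1)).countP (fun x => decide (x < v)) : Int)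
  ll * (((r.length : Int) - 1 - (k : Int) - rl)) + ((k : Int) - ll) * rl

theorem pvGetD_set_self (l : List Int) (i : Nat) (h : i < l.length) (v d : Int) :
    (l.set i v).getD i d = v := by
  simp [List.getD, h]

theorem pvGetD_set_ne (l : List Int) (i k : Nat) (h : ¬ k = i) (v d : Int) :
    (l.set i v).getD k d = l.getD k d := by
  simp [List.getD, Ne.symm h]

theorem pvSet_getD_self (l : List Int) (i : Nat) (h : i < l.length) :
    l.set i (l.getD i 0) = l := by
  apply List.ext_getElem (by simp)
  intro k hk hk2
  by_cases hki : k = i <;> simp [hki, List.getD, h]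

theorem pvInner (r : List Int) (i : Nat) (l : List Int)
    (s : List Int × List Int) (h1 : i < s.1.length) (h2 : i < s.2.length) :
    l.foldl (pvInnerStep r (i : Int)) s =
      (s.1.set i (s.1.getD i 0 + (l.countP (fun j => decide (PySem.List.pyGetD r j 0 < r.getD i 0)) : Int)),
       s.2.set i (s.2.getD i 0 + ((l.length : Int) - (l.countP (fun j => decide (PySem.List.pyGetD r j 0 < r.getD i 0)) : Int)))) := by
  induction l generalizing s with
  | nil =>
    simp only [List.foldl_nil, List.countP_nil, List.length_nil, Nat.cast_zero, add_zero, sub_zero]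
    rw [pvSet_getD_self _ _ h1, pvSet_getD_self _ _ h2]
  | cons x t ih =>
    simp only [List.foldl_cons, pvInnerStep, PySem.List.pySetD_natCast, PySem.List.pyGetD_natCast]
    by_cases hx : PySem.List.pyGetD r x 0 < r.getD i 0
    · rw [if_pos hx, ih (s.1.set i (s.1.getD i 0 + 1), s.2) (by simpa using h1) h2]
      have hd : (decide (PySem.List.pyGetD r x 0 < r.getD i 0)) = true := by simpa using hx
      simp only [List.set_set, List.countP_cons, hd, if_true, Prod.mk.injEq, List.length_cons]
      constructor
      · congr 1
        rw [pvGetD_set_self _ _ h1]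
        omega
      · congr 1
        omega
    · rw [if_neg hx, ih (s.1, s.2.set i (s.2.getD i 0 + 1)) h1 (by simpa using h2)]
      have hd : (decide (PySem.List.pyGetD r x 0 < r.getD i 0)) = false := by simpa using hx
      simp only [List.set_set, List.countP_cons, hd, Bool.false_eq_true, if_false, Prod.mk.injEq, List.length_cons]
      refine ⟨rfl, ?_⟩
      congr 1
      rw [pvGetD_set_self _ _ h2]
      omega

def pvNatCasts (m : Nat) : List Int := (List.range m).map (fun k => Int.ofNat k)

theorem pvNatCasts_succ (m : Nat) : pvNatCasts (m+1) = pvNatCasts m ++ [(m : Int)] := by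
  unfold pvNatCasts
  rw [List.range_succ, List.map_append]
  rfl

theorem pvRange_cast (N : Nat) :
    PySem.List.pyRange 0 (N : Int) 1 = pvNatCasts N := by
  unfold pvNatCasts
  induction N with
  | zero => simp [PySem.List.pyRange_one_eq_nil]
  | succ m ih =>
    have h1 : ((m + 1 : Nat) : Int) = (m : Int) + 1 := by push_cast; ring
    rw [h1, PySem.List.pyRange_one_succ_right (by positivity), ih, List.range_succ]
    simp

def pvCL (r : List Int) (k : Nat) : Int :=
  ((PySem.List.pyRange 0 (k : Int) 1).countP (fun j => decide (PySem.List.pyGetD r j 0 < r.getD k 0)) : Int)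

theorem pvOuterLeft (r : List Int) (N : Nat) (hN : N = r.length) :
    ∀ (m : Nat), m ≤ N → ∀ s : List Int × List Int, s.1.length = N → s.2.length = N →
      ((pvNatCasts m).foldl
        (fun s i => (PySem.List.pyRange 0 i 1).foldl (pvInnerStep r i) s) s).1.length = N ∧
      ((pvNatCasts m).foldl
        (fun s i => (PySem.List.pyRange 0 i 1).foldl (pvInnerStep r i) s) s).2.length = N ∧
      ∀ k : Nat, k < N →
        ((pvNatCasts m).foldl
          (fun s i => (PySem.List.pyRange 0 i 1).foldl (pvInnerStep r i) s) s).1.getD k 0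
          = (if k < m then s.1.getD k 0 + pvCL r k else s.1.getD k 0) ∧
        ((pvNatCasts m).foldl
          (fun s i => (PySem.List.pyRange 0 i 1).foldl (pvInnerStep r i) s) s).2.getD k 0
          = (if k < m then s.2.getD k 0 + ((k : Int) - pvCL r k) else s.2.getD k 0) := by
  intro m
  induction m with
  | zero =>
    intro _ s hs1 hs2
    refine ⟨hs1, hs2, ?_⟩
    intro k hk
    simp [pvNatCasts]
  | succ m ih =>
    intro hm s hs1 hs2
    have hmN : m < N := by omega
    obtain ⟨L1, L2, HV⟩ := ih (by omega) s hs1 hs2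
    rw [pvNatCasts_succ, List.foldl_append]
    simp only [List.foldl_cons, List.foldl_nil]
    set res := (pvNatCasts m).foldl
      (fun s i => (PySem.List.pyRange 0 i 1).foldl (pvInnerStep r i) s) s with hres
    have h1 : m < res.1.length := by rw [L1]; exact hmN
    have h2 : m < res.2.length := by rw [L2]; exact hmN
    rw [pvInner r m _ res h1 h2]
    refine ⟨by simpa using L1, by simpa using L2, ?_⟩
    intro k hk
    by_cases hkm : k = m
    · subst hkm
      obtain ⟨V1, V2⟩ := HV k hk
      rw [pvGetD_set_self _ _ h1, pvGetD_set_self _ _ h2, V1, V2]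
      have hlt : ¬ k < k := by omega
      have hlt2 : k < k + 1 := by omega
      rw [if_neg hlt, if_neg hlt, if_pos hlt2, if_pos hlt2]
      constructor
      · rfl
      · congr 1
        simp only [PySem.List.length_pyRange_one, pvCL]
        omega
    · rw [pvGetD_set_ne _ _ _ hkm, pvGetD_set_ne _ _ _ hkm]
      obtain ⟨V1, V2⟩ := HV k hk
      rw [V1, V2]
      by_cases hkm2 : k < m
      · have : k < m + 1 := by omega
        rw [if_pos hkm2, if_pos hkm2, if_pos this, if_pos this]
        exact ⟨rfl, rfl⟩
      · have : ¬ k < m + 1 := by omega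
        rw [if_neg hkm2, if_neg hkm2, if_neg this, if_neg this]
        exact ⟨rfl, rfl⟩

def pvCR (r : List Int) (k : Nat) : Int :=
  ((PySem.List.pyRange ((r.length : Int) - 1) (k : Int) (-1)).countP (fun j => decide (PySem.List.pyGetD r j 0 < r.getD k 0)) : Int)

theorem pvOuterRight (r : List Int) (N : Nat) (hN : N = r.length) :
    ∀ (m : Nat), m ≤ N → ∀ s : List Int × List Int, s.1.length = N → s.2.length = N →
      (((pvNatCasts m).reverse).foldl
        (fun s i => (PySem.List.pyRange ((r.length : Int) - 1) i (-1)).foldl (pvInnerStep r i) s) s).1.length = N ∧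
      (((pvNatCasts m).reverse).foldl
        (fun s i => (PySem.List.pyRange ((r.length : Int) - 1) i (-1)).foldl (pvInnerStep r i) s) s).2.length = N ∧
      ∀ k : Nat, k < N →
        (((pvNatCasts m).reverse).foldl
          (fun s i => (PySem.List.pyRange ((r.length : Int) - 1) i (-1)).foldl (pvInnerStep r i) s) s).1.getD k 0
          = (if k < m then s.1.getD k 0 + pvCR r k else s.1.getD k 0) ∧
        (((pvNatCasts m).reverse).foldl
          (fun s i => (PySem.List.pyRange ((r.length : Int) - 1) i (-1)).foldl (pvInnerStep r i) s) s).2.getD k 0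
          = (if k < m then s.2.getD k 0 + (((r.length : Int) - 1 - (k : Int)) - pvCR r k) else s.2.getD k 0) := by
  intro m
  induction m with
  | zero =>
    intro _ s hs1 hs2
    refine ⟨hs1, hs2, ?_⟩
    intro k hk
    simp [pvNatCasts]
  | succ m ih =>
    intro hm s hs1 hs2
    have hmN : m < N := by omega
    rw [pvNatCasts_succ, List.reverse_append]
    simp only [List.reverse_cons, List.reverse_nil, List.nil_append, List.cons_append,
      List.foldl_cons]
    have h1 : m < s.1.length := by omega
    have h2 : m < s.2.length := by omega
    rw [pvInner r m _ s h1 h2]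
    set s' : List Int × List Int :=
      (s.1.set m (s.1.getD m 0 + ((PySem.List.pyRange ((r.length : Int) - 1) (m : Int) (-1)).countP
          (fun j => decide (PySem.List.pyGetD r j 0 < r.getD m 0)) : Int)),
       s.2.set m (s.2.getD m 0 + (((PySem.List.pyRange ((r.length : Int) - 1) (m : Int) (-1)).length : Int)
         - ((PySem.List.pyRange ((r.length : Int) - 1) (m : Int) (-1)).countP
          (fun j => decide (PySem.List.pyGetD r j 0 < r.getD m 0)) : Int)))) with hs'
    obtain ⟨L1, L2, HV⟩ := ih (by omega) s' (by simp [hs', hs1]) (by simp [hs', hs2])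
    refine ⟨L1, L2, ?_⟩
    intro k hk
    obtain ⟨V1, V2⟩ := HV k hk
    rw [V1, V2]
    by_cases hkm : k = m
    · subst hkm
      have hlt : ¬ k < k := by omega
      have hlt2 : k < k + 1 := by omega
      rw [if_neg hlt, if_neg hlt, if_pos hlt2, if_pos hlt2]
      constructor
      · rw [hs']
        simp only
        rw [pvGetD_set_self _ _ h1]
        rfl
      · rw [hs']
        simp only
        rw [pvGetD_set_self _ _ h2]
        congr 1
        simp only [PySem.List.length_pyRange_neg_one, pvCR]
        omega
    · by_cases hkm2 : k < m
      · have hl : k < m + 1 := by omega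
        rw [if_pos hkm2, if_pos hkm2, if_pos hl, if_pos hl, hs']
        simp only
        rw [pvGetD_set_ne _ _ _ hkm, pvGetD_set_ne _ _ _ hkm]
        exact ⟨rfl, rfl⟩
      · have hl : ¬ k < m + 1 := by omega
        rw [if_neg hkm2, if_neg hkm2, if_neg hl, if_neg hl, hs']
        simp only
        rw [pvGetD_set_ne _ _ _ hkm, pvGetD_set_ne _ _ _ hkm]
        exact ⟨rfl, rfl⟩

theorem pvCount_range_take (r : List Int) (c : Int) (k : Nat) (hk : k ≤ r.length) :
    (List.range k).countP (fun j => decide (r.getD j 0 < c))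
      = (r.take k).countP (fun x => decide (x < c)) := by
  induction k with
  | zero => simp
  | succ m ih =>
    have hm : m < r.length := by omega
    rw [List.range_succ, List.countP_append, ih (by omega), List.take_add_one]
    rw [List.countP_append]
    congr 1
    have : r[m]? = some r[m] := List.getElem?_eq_getElem hm
    simp [this, List.getD, List.countP_cons]

theorem pvCL_eq (r : List Int) (k : Nat) (hk : k < r.length) :
    pvCL r k = ((r.take k).countP (fun x => decide (x < r.getD k 0)) : Int) := by
  unfold pvCL
  rw [pvRange_cast]
  unfold pvNatCasts
  rw [List.countP_map]
  rw [show ((fun j => decide (PySem.List.pyGetD r j 0 < r.getD k 0)) ∘ (fun j => Int.ofNat j))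
      = (fun j => decide (r.getD j 0 < r.getD k 0)) from by
    funext j
    simp [PySem.List.pyGetD_natCast]]
  rw [pvCount_range_take r _ k (le_of_lt hk)]

theorem pvCR_eq (r : List Int) (k : Nat) (_hk : k < r.length) :
    pvCR r k = ((r.drop (k + 1)).countP (fun x => decide (x < r.getD k 0)) : Int) := by
  unfold pvCR
  rw [PySem.List.pyRange_neg_one_eq_reverse, List.countP_reverse]
  rw [show ((r.length : Int) - 1 + 1) = ((r.length : Int)) from by ring]
  have hmap : (PySem.List.pyRange ((k : Int) + 1) ((r.length : Int)) 1).map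
      (fun j => PySem.List.pyGetD r j 0) = r.drop ((k : Int) + 1).toNat :=
    PySem.List.map_pyGetD_pyRange' r 0 (by positivity)
  have : ((k : Int) + 1).toNat = k + 1 := by omega
  rw [this] at hmap
  rw [show (fun j => decide (PySem.List.pyGetD r j 0 < r.getD k 0))
      = ((fun x => decide (x < r.getD k 0)) ∘ (fun j => PySem.List.pyGetD r j 0)) from rfl]
  rw [← List.countP_map, hmap]

theorem pvFold_sum (f g : Int → Int) : ∀ (m : Nat) (a : Int),
    (pvNatCasts m).foldl (fun c i => c + f i + g i) a
      = a + ((List.range m).map (fun k => f (Int.ofNat k) + g (Int.ofNat k))).sum := by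
  intro m
  induction m with
  | zero => intro a; simp [pvNatCasts]
  | succ m ih =>
    intro a
    rw [pvNatCasts_succ, List.foldl_append, ih, List.range_succ, List.map_append,
      List.sum_append]
    simp
    ring


theorem pvSum_small (r : List Int) (h : r.length < 3) :
    ((List.range r.length).map (pvTerm r)).sum = 0 := by
  match r with
  | [] => simp
  | [a] => simp [pvTerm]
  | [a, b] =>
    simp [pvTerm, List.range_succ]
  | a :: b :: c :: t => simp at h; omega
theorem pvDictPersist (l : List (Int × Int)) :
    ∀ (d : PySem.Dict Int Int) (w : Int), d.contains w = true →
      (l.foldl (fun d kv => if d.contains kv.2 then d else d.insert kv.2 kv.1) d).getD w 0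
        = d.getD w 0
      ∧ (l.foldl (fun d kv => if d.contains kv.2 then d else d.insert kv.2 kv.1) d).contains w
        = true := by
  induction l with
  | nil => intro d w hw; exact ⟨rfl, hw⟩
  | cons kv t ih =>
    intro d w hw
    simp only [List.foldl_cons]
    by_cases hc : d.contains kv.2
    · rw [if_pos hc]; exact ih d w hw
    · rw [if_neg hc]
      have hne : w ≠ kv.2 := by
        intro he; rw [he] at hw; exact hc hw
      obtain ⟨A, B⟩ := ih (d.insert kv.2 kv.1) w
        (by rw [PySem.Dict.contains_insert]; simp [hw])
      refine ⟨?_, B⟩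
      rw [A, PySem.Dict.getD_insert, if_neg hne]

theorem pvDictFirst (s : List Int) (hp : s.Pairwise (· ≤ ·)) :
    ∀ (k0 : Int) (d : PySem.Dict Int Int) (v : Int), v ∈ s → d.contains v = false →
      ((PySem.List.enumerate s k0).foldl
        (fun d kv => if d.contains kv.2 then d else d.insert kv.2 kv.1) d).getD v 0
        = k0 + (s.countP (fun x => decide (x < v)) : Int) := by
  induction s with
  | nil => intro _ _ _ hv; exact absurd hv (List.not_mem_nil)
  | cons x t ih =>
    intro k0 d v hv hdv
    rw [List.pairwise_cons] at hp
    obtain ⟨hx, hpt⟩ := hp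
    rw [PySem.List.enumerate_cons, List.foldl_cons]
    by_cases hvx : v = x
    · subst hvx
      rw [if_neg (by simp [hdv])]
      have hct : t.countP (fun x => decide (x < v)) = 0 := by
        apply List.countP_eq_zero.mpr
        intro a ha
        simp only [decide_eq_true_eq]
        exact not_lt.mpr (hx a ha)
      have hcc : (v :: t).countP (fun x => decide (x < v)) = 0 := by
        rw [List.countP_cons, hct]
        simp
      rw [hcc]
      obtain ⟨A, _⟩ := pvDictPersist (PySem.List.enumerate t (k0 + 1))
        (d.insert v k0) v (by rw [PySem.Dict.contains_insert]; simp)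
      rw [A, PySem.Dict.getD_insert, if_pos rfl]
      simp
    · have hvt : v ∈ t := by
        rcases List.mem_cons.mp hv with h | h
        · exact absurd h hvx
        · exact h
      have hxv : x < v := lt_of_le_of_ne (hx v hvt) (fun he => hvx he.symm)
      have step : ∀ d' : PySem.Dict Int Int, d'.contains v = false →
          ((PySem.List.enumerate t (k0 + 1)).foldl
            (fun d kv => if d.contains kv.2 then d else d.insert kv.2 kv.1) d').getD v 0
          = (k0 + 1) + (t.countP (fun x => decide (x < v)) : Int) :=
        fun d' h => ih hpt (k0 + 1) d' v hvt h
      have hcc : ((x :: t).countP (fun x => decide (x < v)) : Int)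
          = (t.countP (fun x => decide (x < v)) : Int) + 1 := by
        rw [List.countP_cons]
        simp [hxv]
      rw [hcc]
      by_cases hc : d.contains x
      · rw [if_pos hc, step d hdv]; ring
      · rw [if_neg hc, step (d.insert x k0)
          (by rw [PySem.Dict.contains_insert]; simp [hdv, hvx])]
        ring

def pvBterm (S : PySem.Dict Int Int) (n : Int) (r : List Int) (k : Nat) : Int :=
  let v := r.getD k 0
  let ll : Int := ((r.take k).countP (fun x => decide (x < v)) : Int)
  let rl : Int := S.getD v 0 - ll
  ll * (n - 1 - (k : Int) - rl) + ((k : Int) - ll) * rl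

theorem pvGetD_append_len (pre : List Int) (v : Int) (t : List Int) :
    (pre ++ v :: t).getD pre.length 0 = v := by
  simp [List.getD]

theorem pvBFold (S : PySem.Dict Int Int) (n : Int) :
    ∀ (suf pre : List Int) (acc : Int),
      (PySem.List.enumerate suf ((pre.length : Int))).foldl (pvBStep S n) (acc, pre)
        = (acc + ((List.range suf.length).map
            (fun j => pvBterm S n (pre ++ suf) (pre.length + j))).sum, pre ++ suf) := by
  intro suf
  induction suf with
  | nil => intro pre acc; simp [PySem.List.enumerate_nil]
  | cons v t ih =>
    intro pre acc
    rw [PySem.List.enumerate_cons, List.foldl_cons]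
    have hstep : pvBStep S n (acc, pre) ((pre.length : Int), v)
        = (acc + pvBterm S n (pre ++ v :: t) pre.length, pre ++ [v]) := by
      unfold pvBStep pvBterm
      simp only [pvGetD_append_len, List.take_left]
      rw [show (pre.filter (fun x => decide (x < v))).length
          = pre.countP (fun x => decide (x < v)) from List.countP_eq_length_filter.symm]
      refine Prod.ext ?_ rfl
      simp only
      ring
    rw [hstep]
    have hlen : ((pre.length : Int) + 1) = (((pre ++ [v]).length : Int)) := by simp
    rw [hlen, ih (pre ++ [v]) _]
    have hl2 : (pre ++ [v]) ++ t = pre ++ v :: t := by simp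
    refine Prod.ext ?_ (by simp [hl2])
    simp only [hl2]
    simp only [List.length_cons]
    rw [List.range_succ_eq_map, List.map_cons, List.map_map, List.sum_cons]
    have hmc : ((List.range t.length).map ((fun j => pvBterm S n (pre ++ v :: t) (pre.length + j)) ∘ Nat.succ))
        = (List.range t.length).map (fun j => pvBterm S n (pre ++ v :: t) ((pre ++ [v]).length + j)) := by
      apply List.map_congr_left
      intro j _
      simp only [Function.comp]
      congr 1
      simp
      omega
    rw [hmc]
    simp only [Nat.add_zero]
    ring

theorem pvSmaller (r : List Int) (v : Int) (hv : v ∈ r) :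
    ((PySem.List.enumerate (PySem.List.sorted r (fun x => x) false) 0).foldl
      (fun d kv => if d.contains kv.2 then d else d.insert kv.2 kv.1) PySem.Dict.empty).getD v 0
    = (r.countP (fun x => decide (x < v)) : Int) := by
  have hp : (PySem.List.sorted r (fun x => x) false).Pairwise (· ≤ ·) := by
    simpa using PySem.List.sorted_pairwise r (fun x => x)
  have hv' : v ∈ PySem.List.sorted r (fun x => x) false := by
    rw [PySem.List.mem_sorted]
    exact hv
  rw [pvDictFirst _ hp 0 _ v hv' (by simp), zero_add]
  congr 1
  exact List.Perm.countP_eq _ (PySem.List.sorted_perm r (fun x => x) false)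

theorem pvCount_split (r : List Int) (c : Int) (k : Nat) (hk : k < r.length) :
    r.countP (fun x => decide (x < c))
      = (r.take k).countP (fun x => decide (x < c))
        + ((r.drop (k + 1)).countP (fun x => decide (x < c))
           + if r[k] < c then 1 else 0) := by
  conv_lhs => rw [← List.take_append_drop k r]
  rw [List.countP_append, List.drop_eq_getElem_cons hk, List.countP_cons]
  simp
theorem pvB_eq_sum (r : List Int) :
    solution_function_name_alt r = ((List.range r.length).map (pvTerm r)).sum := by
  simp only [solution_function_name_alt]
  rw [show PySem.List.enumerate r 0
      = PySem.List.enumerate r ((([] : List Int).length : Int)) from by simp]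
  rw [pvBFold _ _ r [] 0]
  simp only [List.nil_append, zero_add, List.length_nil]
  congr 1
  apply List.map_congr_left
  intro k hk
  have hkN : k < r.length := List.mem_range.mp hk
  have hg : r.getD k 0 = r[k] := by simp [List.getD, hkN]
  have hv : r.getD k 0 ∈ r := by
    rw [hg]
    exact List.getElem_mem hkN
  simp only [pvBterm, pvTerm]
  rw [pvSmaller r _ hv, pvCount_split r (r.getD k 0) k hkN]
  rw [if_neg (by rw [hg]; exact lt_irrefl _)]
  push_cast
  ring

theorem pvA_eq_sum (r : List Int) :
    solution_function_name r = ((List.range r.length).map (pvTerm r)).sum := by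
  by_cases h3 : (r.length : Int) < 3
  · have hs : r.length < 3 := by omega
    simp only [solution_function_name]
    rw [if_pos h3, pvSum_small r hs]
  · simp only [solution_function_name]
    rw [if_neg h3]
    have hrev : PySem.List.pyRange ((r.length : Int) - 1) (-1) (-1)
        = (pvNatCasts r.length).reverse := by
      rw [PySem.List.pyRange_neg_one_eq_reverse,
        show ((-1 : Int) + 1) = 0 from by ring,
        show ((r.length : Int) - 1 + 1) = ((r.length : Int)) from by ring,
        pvRange_cast]
    rw [hrev, pvRange_cast]
    obtain ⟨LL1, LL2, HL⟩ := pvOuterLeft r r.length rfl r.length le_rfl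
      (List.replicate r.length 0, List.replicate r.length 0) (by simp) (by simp)
    obtain ⟨RL1, RL2, HR⟩ := pvOuterRight r r.length rfl r.length le_rfl
      (List.replicate r.length 0, List.replicate r.length 0) (by simp) (by simp)
    rw [pvFold_sum
      (fun i => PySem.List.pyGetD ((pvNatCasts r.length).foldl
        (fun s i => (PySem.List.pyRange 0 i 1).foldl (pvInnerStep r i) s)
        (List.replicate r.length 0, List.replicate r.length 0)).1 i 0
        * PySem.List.pyGetD (((pvNatCasts r.length).reverse).foldl
        (fun s i => (PySem.List.pyRange ((r.length : Int) - 1) i (-1)).foldl (pvInnerStep r i) s)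
        (List.replicate r.length 0, List.replicate r.length 0)).2 i 0)
      (fun i => PySem.List.pyGetD ((pvNatCasts r.length).foldl
        (fun s i => (PySem.List.pyRange 0 i 1).foldl (pvInnerStep r i) s)
        (List.replicate r.length 0, List.replicate r.length 0)).2 i 0
        * PySem.List.pyGetD (((pvNatCasts r.length).reverse).foldl
        (fun s i => (PySem.List.pyRange ((r.length : Int) - 1) i (-1)).foldl (pvInnerStep r i) s)
        (List.replicate r.length 0, List.replicate r.length 0)).1 i 0)
      r.length 0]
    rw [zero_add]
    congr 1
    apply List.map_congr_left
    intro k hk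
    have hkN : k < r.length := List.mem_range.mp hk
    have hcast : (Int.ofNat k) = ((k : Nat) : Int) := rfl
    simp only [hcast, PySem.List.pyGetD_natCast]
    obtain ⟨V1, V2⟩ := HL k hkN
    obtain ⟨W1, W2⟩ := HR k hkN
    rw [V1, V2, W1, W2, if_pos hkN, if_pos hkN, if_pos hkN, if_pos hkN]
    have h0 : ∀ (m j : Nat), (List.replicate m (0:Int)).getD j 0 = 0 := by
      intro m j
      simp [List.getD, List.getElem?_replicate]
      try split <;> rfl
    simp only [h0, zero_add]
    rw [pvCL_eq r k hkN, pvCR_eq r k hkN]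
    simp only [pvTerm]
    try ring

-- ===== VERDICT (by name: the statement is the Claim_ definition above) =====
theorem solution_function_name_spec : Claim_equal_solution_function_name := by
  intro rating _
  unfold Spec_solution_function_name
  rw [pvA_eq_sum, pvB_eq_sum]
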